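-- pv_equiv track=rewrite | github.com/BenjaminSRussell/Data-visualizer | src/data_visualizer/globals.py | get_palette_for_categories
-- ===== SOURCE A (Python) =====
-- from typing import Dict, List, Tuple
--
-- QUALITATIVE_PALETTES = {
--     "corporate_safe": [
--         "#2E86AB",  # Professional blue - trustworthy, calming
--         "#A23B72",  # Confident magenta - attention without aggression
--         "#F18F01",  # Warm orange - energetic, optimistic
--         "#C73E1D",  # Strategic red - urgency, importance
--         "#7209B7",  # Creative purple - innovation, premium
--         "#588157",  # Growth green - success, stability
--         "#F4A261",  # Friendly amber - approachable, warm
--         "#264653"   # Grounded teal - reliability, depth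
--     ],
--
--     "vibrant_accessible": [
--         "#FF6B6B",  # Coral red - warm, engaging
--         "#4ECDC4",  # Mint teal - fresh, modern
--         "#45B7D1",  # Sky blue - open, trustworthy
--         "#96CEB4",  # Sage green - calm, natural
--         "#FECA57",  # Sunny yellow - optimistic, energetic
--         "#FF9FF3",  # Soft pink - approachable, creative
--         "#54A0FF",  # Electric blue - dynamic, tech-forward
--         "#5F27CD"   # Rich purple - sophisticated, unique
--     ],
--
--     "earth_tones": [
--         "#8D5524",  # Rich brown - grounded, traditional
--         "#C4A484",  # Warm beige - neutral, sophisticated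
--         "#A4AC86",  # Olive green - natural, organic
--         "#656D4A",  # Forest green - stable, enduring
--         "#414833",  # Deep sage - calm, meditative
--         "#333D29",  # Dark moss - mysterious, depth
--         "#FEFAE0",  # Cream - clean, spacious
--         "#DDA15E"   # Golden ochre - warm, inviting
--     ]
-- }
--
-- def get_palette_for_categories(n_categories: int, style: str = "corporate_safe") -> List[str]:
--     """Smart palette selection based on category count and visualization context.
--
--     Future: Could integrate with brand guidelines, user preferences, or
--     automatic accessibility testing for optimal color selection.
--     """
--     if n_categories <= 2:
--         return QUALITATIVE_PALETTES[style][:2]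
--     elif n_categories <= 8:
--         return QUALITATIVE_PALETTES[style][:n_categories]
--     else:
--         # For many categories, cycle through palette with alpha variations
--         base_colors = QUALITATIVE_PALETTES[style]
--         extended = []
--         for i in range(n_categories):
--             color_idx = i % len(base_colors)
--             alpha_level = 1.0 - (i // len(base_colors)) * 0.3
--             extended.append(base_colors[color_idx])
--         return extended
-- ===== SOURCE B (Python) =====
-- from typing import Dict, List, Tuple
--
-- QUALITATIVE_PALETTES = {
--     "corporate_safe": [
--         "#2E86AB", "#A23B72", "#F18F01", "#C73E1D",
--         "#7209B7", "#588157", "#F4A261", "#264653"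
--     ],
--     "vibrant_accessible": [
--         "#FF6B6B", "#4ECDC4", "#45B7D1", "#96CEB4",
--         "#FECA57", "#FF9FF3", "#54A0FF", "#5F27CD"
--     ],
--     "earth_tones": [
--         "#8D5524", "#C4A484", "#A4AC86", "#656D4A",
--         "#414833", "#333D29", "#FEFAE0", "#DDA15E"
--     ]
-- }
--
-- def get_palette_for_categories(n_categories: int, style: str = "corporate_safe") -> List[str]:
--     # Build the answer by whole-palette repetition plus one prefix slice,
--     # instead of selecting colors one by one: count = q * len(base) + r.
--     base = QUALITATIVE_PALETTES[style]
--     count = max(2, n_categories)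
--     q, r = divmod(count, len(base))
--     return base * q + base[:r]
-- ===== Notes on version B (the rewrite author's own statement) =====
-- stated objective: alternative
-- what changed: Instead of selecting colors one by one (slices for small n, a per-index modulo loop for large n), B computes count = max(2, n), splits it as q, r = divmod(count, len(base)) and builds the result by whole-palette repetition plus one prefix slice: base * q + base[:r].
-- outside the precondition, e.g. on get_palette_for_categories(3, 'unknown'): A raises KeyError, B raises KeyError
import Mathlib
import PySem

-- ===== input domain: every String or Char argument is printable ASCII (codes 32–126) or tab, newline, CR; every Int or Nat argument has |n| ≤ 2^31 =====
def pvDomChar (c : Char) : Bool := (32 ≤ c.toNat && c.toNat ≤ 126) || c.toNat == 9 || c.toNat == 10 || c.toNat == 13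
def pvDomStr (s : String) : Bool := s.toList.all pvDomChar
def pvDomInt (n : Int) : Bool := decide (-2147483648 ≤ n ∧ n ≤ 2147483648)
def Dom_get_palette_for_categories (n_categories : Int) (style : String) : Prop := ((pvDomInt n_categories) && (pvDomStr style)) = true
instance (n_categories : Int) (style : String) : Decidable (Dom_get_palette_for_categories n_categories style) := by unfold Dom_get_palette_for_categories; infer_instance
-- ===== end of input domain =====

-- B replaces A's per-element selection (slices for small n, an index-modulo append loop
-- for large n) by count = max(2, n); q, r = divmod(count, len(base)); base * q + base[:r].

-- module-level constant QUALITATIVE_PALETTES (shared context of both programs)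
def QUALITATIVE_PALETTES : PySem.Dict String (List String) :=
  PySem.Dict.ofList
    [ ("corporate_safe",
        ["#2E86AB", "#A23B72", "#F18F01", "#C73E1D", "#7209B7", "#588157", "#F4A261", "#264653"]),
      ("vibrant_accessible",
        ["#FF6B6B", "#4ECDC4", "#45B7D1", "#96CEB4", "#FECA57", "#FF9FF3", "#54A0FF", "#5F27CD"]),
      ("earth_tones",
        ["#8D5524", "#C4A484", "#A4AC86", "#656D4A", "#414833", "#333D29", "#FEFAE0", "#DDA15E"]) ]

-- ===== PORT A =====
def get_palette_for_categories (n_categories : Int) (style : String) : List String :=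
  if n_categories ≤ 2 then
    PySem.List.slice ((QUALITATIVE_PALETTES.get? style).getD []) none (some 2)
  else if n_categories ≤ 8 then
    PySem.List.slice ((QUALITATIVE_PALETTES.get? style).getD []) none (some n_categories)
  else
    let base_colors := (QUALITATIVE_PALETTES.get? style).getD []
    (PySem.List.pyRange 0 n_categories 1).foldl
      (fun extended i =>
        extended ++ [PySem.List.pyGetD base_colors (PySem.Int.mod i (base_colors.length : Int)) ""])
      []

-- ===== PORT B =====
def get_palette_for_categories_alt (n_categories : Int) (style : String) : List String :=
  let base := (QUALITATIVE_PALETTES.get? style).getD []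
  let count : Int := max 2 n_categories
  let q := PySem.Int.floordiv count (base.length : Int)
  let r := PySem.Int.mod count (base.length : Int)
  (List.replicate q.toNat base).flatten ++ PySem.List.slice base none (some r)

-- ===== PRECONDITION & SPEC =====
-- Pre_ excludes unknown styles, on which Python A (and B) raise KeyError.
def Pre_get_palette_for_categories (n_categories : Int) (style : String) : Prop :=
  style = "corporate_safe" ∨ style = "vibrant_accessible" ∨ style = "earth_tones"
instance (n_categories : Int) (style : String) : Decidable (Pre_get_palette_for_categories n_categories style) := by unfold Pre_get_palette_for_categories; infer_instance

def pvWitness_get_palette_for_categories : Int × String := (3, "corporate_safe")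

def Spec_get_palette_for_categories (n_categories : Int) (style : String) (out : List String) : Prop := out = get_palette_for_categories_alt n_categories style
instance (n_categories : Int) (style : String) (out : List String) : Decidable (Spec_get_palette_for_categories n_categories style out) := by unfold Spec_get_palette_for_categories; infer_instance

-- ===== CLAIM =====
def Claim_equal_get_palette_for_categories : Prop := ∀ (n_categories : Int) (style : String), Dom_get_palette_for_categories n_categories style → Pre_get_palette_for_categories n_categories style → Spec_get_palette_for_categories n_categories style (get_palette_for_categories n_categories style)

-- ===== LEMMAS AND PROOFS =====

-- The cyclic-selection map over range(k) equals q whole copies of base plus a prefix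
-- of length r, where q = k / 8 and r = k % 8 (base has 8 elements).
theorem cyc_eq (base : List String) (h8 : base.length = 8) :
    ∀ (k : Nat),
    (PySem.List.pyRange 0 (k : Int) 1).map
        (fun i => PySem.List.pyGetD base (PySem.Int.mod i (base.length : Int)) "")
      = (List.replicate (k / 8) base).flatten
          ++ PySem.List.slice base none (some ((k % 8 : Nat) : Int)) := by
  rcases base with _ | ⟨x0, _ | ⟨x1, _ | ⟨x2, _ | ⟨x3, _ | ⟨x4, _ | ⟨x5, _ | ⟨x6, _ | ⟨x7, rest⟩⟩⟩⟩⟩⟩⟩⟩ <;>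
    simp only [List.length] at h8 <;> try omega
  have hrest : rest = [] := List.eq_nil_of_length_eq_zero (by omega)
  subst hrest
  intro k
  induction k using Nat.strong_induction_on with
  | _ k ih =>
    by_cases hk : k < 8
    · interval_cases k <;> rfl
    · have h8k : (8 : Int) ≤ (k : Int) := by exact_mod_cast Nat.le_of_not_lt hk
      rw [PySem.List.pyRange_one_append 0 8 (k : Int) (by norm_num) h8k, List.map_append]
      have hfirst :
          (PySem.List.pyRange 0 8 1).map
            (fun i => PySem.List.pyGetD ([x0,x1,x2,x3,x4,x5,x6,x7]) (PySem.Int.mod i (([x0,x1,x2,x3,x4,x5,x6,x7] : List String).length : Int)) "")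
          = [x0,x1,x2,x3,x4,x5,x6,x7] := by rfl
      have hshift :
          (PySem.List.pyRange 8 (k : Int) 1).map
            (fun i => PySem.List.pyGetD ([x0,x1,x2,x3,x4,x5,x6,x7]) (PySem.Int.mod i (([x0,x1,x2,x3,x4,x5,x6,x7] : List String).length : Int)) "")
          = (PySem.List.pyRange 0 ((k - 8 : Nat) : Int) 1).map
            (fun i => PySem.List.pyGetD ([x0,x1,x2,x3,x4,x5,x6,x7]) (PySem.Int.mod i (([x0,x1,x2,x3,x4,x5,x6,x7] : List String).length : Int)) "") := by
        rw [PySem.List.pyRange_one, PySem.List.pyRange_one, List.map_map, List.map_map]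
        have hlen : ((k : Int) - 8).toNat = (((k - 8 : Nat) : Int) - 0).toNat := by omega
        rw [hlen]
        apply List.map_congr_left
        intro j _
        simp only [Function.comp]
        congr 1
        simp only [List.length_cons, List.length_nil]
        rw [PySem.Int.mod_eq_emod_of_pos (by norm_num), PySem.Int.mod_eq_emod_of_pos (by norm_num)]
        omega
      rw [hfirst, hshift, ih (k - 8) (by omega)]
      have hq : k / 8 = (k - 8) / 8 + 1 := by omega
      have hr : k % 8 = (k - 8) % 8 := by omega
      rw [hq, hr, List.replicate_succ, List.flatten_cons, List.append_assoc]

theorem core_equal (n : Int) (base : List String) (h8 : base.length = 8) :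
    (if n ≤ 2 then PySem.List.slice base none (some 2)
     else if n ≤ 8 then PySem.List.slice base none (some n)
     else (PySem.List.pyRange 0 n 1).foldl
        (fun extended i => extended ++ [PySem.List.pyGetD base (PySem.Int.mod i (base.length : Int)) ""]) [])
  = (List.replicate (PySem.Int.floordiv (max 2 n) (base.length : Int)).toNat base).flatten
      ++ PySem.List.slice base none (some (PySem.Int.mod (max 2 n) (base.length : Int))) := by
  rw [h8]
  simp only [Nat.cast_ofNat]
  by_cases h2 : n ≤ 2
  · rw [if_pos h2, max_eq_left h2]
    have hq : PySem.Int.floordiv 2 8 = 0 := by decide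
    have hr : PySem.Int.mod 2 8 = 2 := by decide
    rw [hq, hr]
    simp
  · by_cases h8' : n ≤ 8
    · rw [if_neg h2, if_pos h8', max_eq_right (by omega)]
      rcases base with _ | ⟨x0, _ | ⟨x1, _ | ⟨x2, _ | ⟨x3, _ | ⟨x4, _ | ⟨x5, _ | ⟨x6, _ | ⟨x7, rest⟩⟩⟩⟩⟩⟩⟩⟩ <;>
        simp only [List.length] at h8 <;> try omega
      have hrest : rest = [] := List.eq_nil_of_length_eq_zero (by omega)
      subst hrest
      interval_cases n <;> rfl
    · rw [if_neg h2, if_neg h8', max_eq_right (by omega)]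
      rw [PySem.List.foldl_append_singleton_eq_map]
      have hn : n = ((n.toNat : Nat) : Int) := by omega
      have hc := cyc_eq base h8 n.toNat
      simp only [h8, Nat.cast_ofNat] at hc
      rw [hn, hc]
      simp
      have hmax : (max n 0 / 8).toNat = n.toNat / 8 := by omega
      rw [hmax]

theorem main_equal (n : Int) (style : String)
    (hs : Pre_get_palette_for_categories n style) :
    get_palette_for_categories n style = get_palette_for_categories_alt n style := by
  rcases hs with h | h | h <;> subst h <;>
    exact core_equal n _ (by decide)

-- ===== VERDICT =====
theorem get_palette_for_categories_spec : Claim_equal_get_palette_for_categories := by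
  intro n style _ hpre
  exact main_equal n style hpre
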